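-- pv_equiv track=rewrite | github.com/recobaself/python_playground | BioCodes/findp.py | bcr_table1
-- ===== SOURCE A (Python) =====
-- def bcr_table1(p):
--     '''
--     This is another version to get the bad character rules table for pattern p.
--     '''
--     bcr_table = {}
--     for i in range(-1, -len(p), -1):#i is the first mismatch from right to left.
--         bcr_table[i] = {}
--         t = p[i-1::-1]
--
--         for item in 'ATGC':
--             if item in t:
--                 bcr_table[i][item] = t.find(item) + 1#我原先的思路是用 while 循环遍历找到该 item 的下标
--             else:
--                 bcr_table[i][item] = len(t) + 1
--     bcr_table[-len(p)] = {'A':1, 'T':1, 'G':1, 'C':1}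
--
--     return bcr_table
-- ===== SOURCE B (Python) =====
-- def bcr_table1(p):
--     '''
--     Bad character rule table for pattern p, built in one left-to-right pass
--     keeping the last-seen index of each alphabet character.
--     '''
--     n = len(p)
--     last = {}
--     rows = []
--     for j in range(n):
--         rows.append({c: j - last.get(c, -1) for c in 'ATGC'})
--         last[p[j]] = j
--     if not rows:
--         rows.append({c: 1 for c in 'ATGC'})
--     out = {}
--     for j in range(len(rows) - 1, -1, -1):
--         out[j - n] = rows[j]
--     return out
-- ===== Notes on version B (the rewrite author's own statement) =====
-- stated objective: faster
-- what changed: A rebuilds the reversed prefix p[i-1::-1] and scans it with find for each of the four letters at every position (quadratic); B makes one left-to-right pass keeping the last-seen index of each character and derives every row from it, then emits the rows back-to-front.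
import Mathlib
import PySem

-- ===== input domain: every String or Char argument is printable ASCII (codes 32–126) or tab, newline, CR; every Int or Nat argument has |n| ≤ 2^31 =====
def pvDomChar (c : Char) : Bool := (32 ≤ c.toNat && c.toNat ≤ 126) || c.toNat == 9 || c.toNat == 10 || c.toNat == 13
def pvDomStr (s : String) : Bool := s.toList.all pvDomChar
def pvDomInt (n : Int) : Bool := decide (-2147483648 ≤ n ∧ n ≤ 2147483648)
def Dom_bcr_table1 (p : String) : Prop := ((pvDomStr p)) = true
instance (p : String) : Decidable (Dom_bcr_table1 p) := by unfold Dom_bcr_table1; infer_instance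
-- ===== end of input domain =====

-- B replaces A's quadratic per-position reversed-prefix scans by one left-to-right pass that
-- keeps the last-seen index of each alphabet character (objective: faster).

-- ===== PORT A =====

-- A's inner loop: for item in 'ATGC' over the reversed prefix t = p[i-1::-1]
def bcrInnerA (t : List Char) : PySem.Dict String Int :=
  ['A', 'T', 'G', 'C'].foldl
    (fun d item =>
      if PySem.Chars.isIn [item] t then
        d.insert (String.ofList [item]) (PySem.Chars.find t [item] + 1)
      else
        d.insert (String.ofList [item]) ((PySem.Chars.len t : Int) + 1))
    PySem.Dict.empty

def bcr_table1 (p : String) : List (Int × List (String × Int)) :=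
  let cs := p.toList
  let n : Int := (PySem.Chars.len cs : Int)
  let d := (PySem.List.pyRange (-1) (-n) (-1)).foldl
    (fun d i =>
      match PySem.List.slice? cs (some (i - 1)) none (-1) with
      | some t => d.insert i (bcrInnerA t)
      | none => d)
    PySem.Dict.empty
  let d := d.insert (-n) (PySem.Dict.ofList [("A", 1), ("T", 1), ("G", 1), ("C", 1)])
  d.items.map (fun kv => (kv.1, kv.2.items))

-- ===== PORT B =====

-- B's row comprehension: {c: j - last.get(c, -1) for c in 'ATGC'}
def bcrRowB (last : PySem.Dict String Int) (j : Int) : PySem.Dict String Int :=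
  ['A', 'T', 'G', 'C'].foldl
    (fun d c => d.insert (String.ofList [c]) (j - last.getD (String.ofList [c]) (-1)))
    PySem.Dict.empty

def bcr_table1_alt (p : String) : List (Int × List (String × Int)) :=
  let cs := p.toList
  let n : Int := (PySem.Chars.len cs : Int)
  let st := (PySem.List.pyRange 0 n 1).foldl
    (fun (st : PySem.Dict String Int × List (PySem.Dict String Int)) j =>
      (st.1.insert (String.ofList [PySem.List.pyGetD cs j ' ']) j, st.2 ++ [bcrRowB st.1 j]))
    (PySem.Dict.empty, [])
  let rows := if st.2.isEmpty then
      [['A', 'T', 'G', 'C'].foldl (fun d c => d.insert (String.ofList [c]) 1) PySem.Dict.empty]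
    else st.2
  let out := (PySem.List.pyRange ((rows.length : Int) - 1) (-1) (-1)).foldl
    (fun o j => o.insert (j - n) (PySem.List.pyGetD rows j PySem.Dict.empty))
    PySem.Dict.empty
  out.items.map (fun kv => (kv.1, kv.2.items))

-- ===== PRECONDITION & SPEC =====
def Spec_bcr_table1 (p : String) (out : List (Int × List (String × Int))) : Prop := out = bcr_table1_alt p
instance (p : String) (out : List (Int × List (String × Int))) : Decidable (Spec_bcr_table1 p out) := by unfold Spec_bcr_table1; infer_instance

-- ===== CLAIM (what is proved, stated in full; the proofs are below) =====
def Claim_equal_bcr_table1 : Prop := ∀ (p : String), Dom_bcr_table1 p → Spec_bcr_table1 p (bcr_table1 p)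

-- ===== LEMMAS AND PROOFS =====

lemma singleton_prefix_iff (c : Char) (l : List Char) : [c] <+: l ↔ l.head? = some c := by
  cases l with
  | nil => simp
  | cons x xs =>
    constructor
    · rintro ⟨t, ht⟩; simp at ht; simp [ht.1]
    · intro h; simp at h; exact ⟨xs, by simp [h]⟩

lemma singleton_infix_iff (c : Char) (l : List Char) : [c] <:+: l ↔ c ∈ l := by
  constructor
  · intro h; exact h.mem (by simp)
  · intro h
    obtain ⟨s, t, hst⟩ := List.append_of_mem h
    exact ⟨s, t, by simp [hst]⟩

lemma find_singleton (t : List Char) (c : Char) :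
    PySem.Chars.find t [c] =
      match List.idxOf? c t with
      | some k => (k : Int)
      | none => -1 := by
  by_cases hm : c ∈ t
  · have h0 : 0 ≤ PySem.Chars.find t [c] :=
      (PySem.Chars.find_nonneg_iff t [c]).mpr ((singleton_infix_iff c t).mpr hm)
    obtain ⟨hpre, hmin⟩ := PySem.Chars.find_spec h0
    set k := (PySem.Chars.find t [c]).toNat with hk
    have hhead : (t.drop k).head? = some c := (singleton_prefix_iff c _).mp hpre
    have hget : t[k]? = some c := by rwa [List.head?_drop] at hhead
    have hklen : k < t.length := by
      by_contra h
      rw [List.getElem?_eq_none (by omega)] at hget; simp at hget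
    have hidx : List.idxOf? c t = some k := by
      rw [List.idxOf?_eq_some_iff]
      refine ⟨hklen, by simpa [List.getElem?_eq_getElem hklen] using hget, ?_⟩
      intro j hj
      have := hmin j hj
      rw [singleton_prefix_iff, List.head?_drop] at this
      intro hc
      exact this (by rw [List.getElem?_eq_getElem (by omega)]; simp [hc])
    rw [hidx]
    exact (Int.toNat_of_nonneg h0).symm
  · have : List.idxOf? c t = none := List.idxOf?_eq_none_iff.mpr hm
    rw [this, (PySem.Chars.find_eq_neg_one_iff t [c]).mpr]
    rw [singleton_infix_iff]; exact hm

def lastIdx (l : List Char) (c : Char) : Int :=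
  match List.idxOf? c l.reverse with
  | some k => (l.length : Int) - 1 - (k : Int)
  | none => -1

lemma lastIdx_append (l : List Char) (x c : Char) :
    lastIdx (l ++ [x]) c = if x = c then (l.length : Int) else lastIdx l c := by
  unfold lastIdx
  rw [List.reverse_append]
  simp only [List.reverse_cons, List.reverse_nil, List.nil_append, List.singleton_append,
    List.idxOf?_cons]
  by_cases hx : x = c
  · simp [hx]
  · simp only [beq_iff_eq, hx, if_false]
    cases h : List.idxOf? c l.reverse with
    | none => simp
    | some k => simp; omega

def rowD (l : List Char) : PySem.Dict String Int :=
  ['A', 'T', 'G', 'C'].foldl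
    (fun d c => d.insert (String.ofList [c]) ((l.length : Int) - lastIdx l c))
    PySem.Dict.empty

lemma innerA_eq_rowD (l : List Char) : bcrInnerA l.reverse = rowD l := by
  unfold bcrInnerA rowD
  apply PySem.List.foldl_congr_mem
  intro d c _
  by_cases hm : c ∈ l
  · have hin : PySem.Chars.isIn [c] l.reverse = true := by
      rw [PySem.Chars.isIn_iff_infix, singleton_infix_iff]; simpa using hm
    have hmem : c ∈ l.reverse := by simpa using hm
    obtain ⟨k, hk⟩ := Option.isSome_iff_exists.mp (List.isSome_idxOf?.mpr hmem)
    have hklen : k < l.length := by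
      have := List.idxOf?_eq_some_iff.mp hk
      simpa using this.1
    have hfind : PySem.Chars.find l.reverse [c] = (k : Int) := by
      rw [find_singleton, hk]
    have hlast : lastIdx l c = (l.length : Int) - 1 - (k : Int) := by
      unfold lastIdx; rw [hk]
    rw [if_pos hin, hfind, hlast]
    congr 1
    omega
  · have hin : PySem.Chars.isIn [c] l.reverse = false := by
      rw [← Bool.not_eq_true, PySem.Chars.isIn_iff_infix, singleton_infix_iff]
      simpa using hm
    have hlast : lastIdx l c = -1 := by
      unfold lastIdx
      rw [List.idxOf?_eq_none_iff.mpr (by simpa using hm)]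
    rw [if_neg (by simp [hin]), hlast]
    congr 1
    simp [PySem.Chars.len_eq]

lemma slice_rev_prefix (cs : List Char) (a : Int) (h1 : -(cs.length : Int) ≤ a) (h2 : a < 0) :
    PySem.List.slice? cs (some a) none (-1) =
      some ((cs.take ((cs.length : Int) + a + 1).toNat).reverse) := by
  unfold PySem.List.slice? PySem.List.sliceIndices
  simp only [show ¬((-1:Int) = 0) from by norm_num, if_false, show ((-1:Int) < 0) from by norm_num,
    if_true, if_pos h2, show ¬(0 < (-1:Int)) from by norm_num]
  have hstart : max (a + (cs.length : Int)) (-1) = a + (cs.length : Int) := by omega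
  rw [hstart, if_pos (show (-1:Int) < a + (cs.length : Int) from by omega)]
  have hcount : ((a + (cs.length : Int) - -1 + - -1 - 1) / - -1) = a + (cs.length : Int) + 1 := by
    norm_num
  rw [hcount]
  congr 1
  have hml : ((cs.length : Int) + a + 1).toNat = (a + (cs.length : Int) + 1).toNat := by omega
  rw [hml]
  set m : Nat := (a + (cs.length : Int) + 1).toNat with hm
  have hmlen : m ≤ cs.length := by omega
  have hstep : ∀ k ∈ List.range m,
      cs[(a + (cs.length : Int) + -1 * (k : Int)).toNat]? =
        some ((cs.take m).reverse.getD k 'A') := by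
    intro k hk
    rw [List.mem_range] at hk
    have hidx : (a + (cs.length : Int) + -1 * (k : Int)).toNat = m - 1 - k := by omega
    have hlen : (cs.take m).reverse.length = m := by simp [List.length_take]; omega
    rw [hidx, List.getElem?_eq_getElem (show m - 1 - k < cs.length from by omega),
      List.getD_eq_getElem _ _ (by omega : k < (cs.take m).reverse.length)]
    congr 1
    rw [List.getElem_reverse, List.getElem_take]
    congr 1
    simp [List.length_take]
    omega
  rw [List.filterMap_congr hstep]
  rw [show (fun x => some ((List.take m cs).reverse.getD x 'A')) = some ∘ (fun x => (List.take m cs).reverse.getD x 'A') from rfl, List.filterMap_eq_map]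
  apply List.ext_getElem
  · simp [List.length_take]; omega
  · intro i h1i h2i
    simp only [List.getElem_map, List.getElem_range]
    rw [List.getD_eq_getElem]

lemma ofList_single_inj {a b : Char} (h : String.ofList [a] = String.ofList [b]) : a = b := by
  have := congrArg String.toList h
  simpa using this

lemma rowB_eq_rowD (l : List Char) (last : PySem.Dict String Int)
    (h : ∀ c : Char, last.getD (String.ofList [c]) (-1) = lastIdx l c) :
    bcrRowB last (l.length : Int) = rowD l := by
  unfold bcrRowB rowD
  apply PySem.List.foldl_congr_mem
  intro d c _
  rw [h c]

lemma last_step (l : List Char) (x : Char) (last : PySem.Dict String Int)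
    (h : ∀ c : Char, last.getD (String.ofList [c]) (-1) = lastIdx l c) :
    ∀ c : Char, (last.insert (String.ofList [x]) (l.length : Int)).getD (String.ofList [c]) (-1)
      = lastIdx (l ++ [x]) c := by
  intro c
  rw [lastIdx_append]
  by_cases hxc : x = c
  · subst hxc
    rw [PySem.Dict.getD_insert_self, if_pos rfl]
  · rw [PySem.Dict.getD_insert_of_ne last _ _ (fun hh => hxc (ofList_single_inj hh).symm), h c,
      if_neg hxc]

lemma loopB (cs : List Char) : ∀ (m : Nat) (j : Nat), j + m = cs.length →
    ∀ (last : PySem.Dict String Int) (rows : List (PySem.Dict String Int)),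
    (∀ c : Char, last.getD (String.ofList [c]) (-1) = lastIdx (cs.take j) c) →
    ((PySem.List.pyRange (j : Int) (cs.length : Int) 1).foldl
      (fun (st : PySem.Dict String Int × List (PySem.Dict String Int)) j =>
        (st.1.insert (String.ofList [PySem.List.pyGetD cs j ' ']) j, st.2 ++ [bcrRowB st.1 j]))
      (last, rows)).2
    = rows ++ (List.range' j m).map (fun j' => rowD (cs.take j')) := by
  intro m
  induction m with
  | zero =>
    intro j hj last rows _
    rw [PySem.List.pyRange_one_eq_nil (by omega)]
    simp
  | succ m ih =>
    intro j hj last rows hinv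
    rw [PySem.List.pyRange_one_cons (by omega : (j : Int) < (cs.length : Int))]
    rw [List.foldl_cons]
    have hget : PySem.List.pyGetD cs (j : Int) ' ' = cs[j]'(by omega) :=
      PySem.List.pyGetD_eq_getElem cs ' ' (by omega) (by omega)
    have htake : (cs.take j).length = j := by simp; omega
    have hrow : bcrRowB last (j : Int) = rowD (cs.take j) := by
      have := rowB_eq_rowD (cs.take j) last hinv
      rwa [htake] at this
    have htakesucc : cs.take (j + 1) = cs.take j ++ [cs[j]'(by omega)] := by
      rw [List.take_add_one, List.getElem?_eq_getElem (by omega)]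
      simp
    have hinv' : ∀ c : Char,
        (last.insert (String.ofList [PySem.List.pyGetD cs (j : Int) ' ']) (j : Int)).getD
          (String.ofList [c]) (-1) = lastIdx (cs.take (j + 1)) c := by
      intro c
      rw [hget, htakesucc]
      have := last_step (cs.take j) (cs[j]'(by omega)) last hinv c
      rwa [htake] at this
    have hcast : ((j : Int) + 1) = ((j + 1 : Nat) : Int) := by omega
    rw [hcast]
    rw [ih (j + 1) (by omega) _ (rows ++ [bcrRowB last (j : Int)]) hinv']
    rw [hrow, List.range'_succ, List.map_cons, List.append_assoc]
    simp

def onesDict : PySem.Dict String Int := PySem.Dict.ofList [("A", 1), ("T", 1), ("G", 1), ("C", 1)]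

def pvV (cs : List Char) (i : Int) : PySem.Dict String Int :=
  if i = -(cs.length : Int) then onesDict else rowD (cs.take ((cs.length : Int) + i).toNat)

lemma A_items (p : String) :
    bcr_table1 p = (PySem.List.pyRange (-1) (-(p.toList.length : Int)) (-1) ++
        [-(p.toList.length : Int)]).map
      (fun i => (i, (pvV p.toList i).items)) := by
  simp only [bcr_table1, PySem.Chars.len_eq]
  set cs := p.toList with hcs
  set n : Int := (cs.length : Int) with hn
  have hstep : ∀ (d : PySem.Dict Int (PySem.Dict String Int)), ∀ i ∈ PySem.List.pyRange (-1) (-n) (-1),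
      (match PySem.List.slice? cs (some (i - 1)) none (-1) with
        | some t => d.insert i (bcrInnerA t)
        | none => d)
      = d.insert i (pvV cs i) := by
    intro d i hi
    rw [PySem.List.mem_pyRange_neg_one] at hi
    rw [slice_rev_prefix cs (i - 1) (by omega) (by omega)]
    show d.insert i (bcrInnerA ((cs.take ((cs.length : Int) + (i - 1) + 1).toNat).reverse)) = _
    rw [innerA_eq_rowD]
    unfold pvV
    rw [if_neg (by omega)]
    have : n + (i - 1) + 1 = n + i := by ring
    rw [this]
  rw [PySem.List.foldl_congr_mem _ _ _ _ hstep]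
  have hins : (PySem.Dict.ofList [("A", (1:Int)), ("T", 1), ("G", 1), ("C", 1)]) = pvV cs (-n) := by
    unfold pvV
    rw [if_pos rfl]
    rfl
  rw [hins]
  have happ : ((PySem.List.pyRange (-1) (-n) (-1)).foldl (fun d i => d.insert i (pvV cs i))
        PySem.Dict.empty).insert (-n) (pvV cs (-n))
      = (PySem.List.pyRange (-1) (-n) (-1) ++ [-n]).foldl (fun d i => d.insert i (pvV cs i))
        PySem.Dict.empty := by
    rw [List.foldl_append]
    rfl
  rw [happ]
  rw [PySem.Dict.items_foldl_insert_fresh _ (fun i => i) (fun i => pvV cs i) _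
    (by intro a _; exact PySem.Dict.contains_empty a)
    (by
      simp only [List.map_id_fun', id_eq]
      rw [List.nodup_append]
      refine ⟨?_, by simp, ?_⟩
      · rw [PySem.List.pyRange_neg_one_eq_reverse]
        exact List.nodup_reverse.mpr (PySem.List.nodup_pyRange_one _ _)
      · intro x hx y hy
        rw [List.mem_singleton] at hy
        subst hy
        rw [PySem.List.mem_pyRange_neg_one] at hx
        omega)]
  simp [Function.comp_def, PySem.Dict.empty]

lemma B_items (p : String) (hne : p.toList ≠ []) :
    bcr_table1_alt p = (PySem.List.pyRange ((p.toList.length : Int) - 1) (-1) (-1)).map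
      (fun j => (j - (p.toList.length : Int), (rowD (p.toList.take j.toNat)).items)) := by
  simp only [bcr_table1_alt, PySem.Chars.len_eq]
  set cs := p.toList with hcs
  have hN : 0 < cs.length := List.length_pos_iff.mpr hne
  have hloop := loopB cs cs.length 0 (by omega) PySem.Dict.empty []
    (by intro c; simp [lastIdx])
  rw [show ((0:Nat):Int) = (0:Int) from rfl] at hloop
  rw [hloop]
  have hrows : (List.range' 0 cs.length).map (fun j' => rowD (cs.take j')) ≠ [] := by
    simp; omega
  rw [List.nil_append] at *
  rw [if_neg (by simpa [List.isEmpty_iff] using hrows)]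
  have hlen : (((List.range' 0 cs.length).map (fun j' => rowD (cs.take j'))).length : Int)
      = (cs.length : Int) := by simp
  rw [hlen]
  have hstep : ∀ (o : PySem.Dict Int (PySem.Dict String Int)),
      ∀ j ∈ PySem.List.pyRange ((cs.length : Int) - 1) (-1) (-1),
      o.insert (j - (cs.length : Int))
        (PySem.List.pyGetD ((List.range' 0 cs.length).map (fun j' => rowD (cs.take j')))
          j PySem.Dict.empty)
      = o.insert (j - (cs.length : Int)) (rowD (cs.take j.toNat)) := by
    intro o j hj
    rw [PySem.List.mem_pyRange_neg_one] at hj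
    rw [PySem.List.pyGetD_eq_getElem _ _ (by omega)
      (by simp only [List.length_map, List.length_range']; omega)]
    congr 1
    rw [List.getElem_map, List.getElem_range']
    norm_num
  rw [PySem.List.foldl_congr_mem _ _ _ _ hstep]
  rw [PySem.Dict.items_foldl_insert_fresh _ (fun j => j - (cs.length : Int))
    (fun j => rowD (cs.take j.toNat)) _
    (by intro a _; exact PySem.Dict.contains_empty _)
    (by
      apply List.Nodup.map
      · exact fun a b hab => by omega
      · rw [PySem.List.pyRange_neg_one_eq_reverse]
        exact List.nodup_reverse.mpr (PySem.List.nodup_pyRange_one _ _))]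
  simp [Function.comp_def, PySem.Dict.empty]

-- ===== VERDICT (by name: the statement is the Claim_ definition above) =====
theorem bcr_table1_spec : Claim_equal_bcr_table1 := by
  intro p _
  unfold Spec_bcr_table1
  rcases eq_or_ne p.toList [] with hnil | hne
  · simp only [bcr_table1, bcr_table1_alt, hnil]
    rfl
  · rw [A_items, B_items p hne]
    set cs := p.toList with hcs
    have hN : 0 < cs.length := List.length_pos_iff.mpr hne
    obtain ⟨M, hM⟩ : ∃ M, cs.length = M + 1 := ⟨cs.length - 1, by omega⟩
    rw [hM]
    have hA : PySem.List.pyRange (-1) (-(((M + 1 : Nat)) : Int)) (-1)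
        = (List.range M).map (fun (k : Nat) => -1 - (k : Int)) := by
      rw [PySem.List.pyRange_neg_one,
        show ((-1 : Int) - -(((M + 1 : Nat)) : Int)).toNat = M from by omega]
    have hB : PySem.List.pyRange ((((M + 1 : Nat)) : Int) - 1) (-1) (-1)
        = (List.range (M + 1)).map (fun (k : Nat) => (((M + 1 : Nat)) : Int) - 1 - (k : Int)) := by
      rw [PySem.List.pyRange_neg_one,
        show ((((M + 1 : Nat)) : Int) - 1 - (-1)).toNat = M + 1 from by omega]
    rw [hA, hB, List.range_succ]
    simp only [List.map_append, List.map_map]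
    congr 1
    · apply List.map_congr_left
      intro k hk
      rw [List.mem_range] at hk
      simp only [Function.comp_def]
      unfold pvV
      rw [hM]
      rw [if_neg (by omega)]
      have h1 : (((M + 1 : Nat)) : Int) - 1 - (k : Int) - ((M + 1 : Nat) : Int)
          = -1 - (k : Int) := by push_cast; ring
      have h2 : (((M + 1 : Nat) : Int) + (-1 - (k : Int))).toNat
          = ((((M + 1 : Nat)) : Int) - 1 - (k : Int)).toNat := by omega
      rw [h1, h2]
    · simp only [List.map_cons, List.map_nil, Function.comp_def]
      unfold pvV
      rw [hM]
      rw [if_pos rfl]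
      have h0 : (((M + 1 : Nat)) : Int) - 1 - (M : Int) = 0 := by push_cast; ring
      rw [h0]
      have hones : rowD [] = onesDict := by decide
      simp [hones.symm]
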